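-- pv_equiv track=rewrite | github.com/FernandoFCruz/Inteligencia-Personalizada | app/data_pipeline/semantic_tagging.py | generate_smart_description
-- ===== SOURCE A (Python) =====
-- def generate_smart_description(table: str, columns: list):
--     col_names = [c["name"].lower() for c in columns]
--     ctx = []
--
--     if any(x in col_names for x in ["cpf", "cnpj", "cliente", "nome", "email"]):
--         ctx.append("This table stores information related to clients or people.")
--     if any(x in col_names for x in ["produto", "sku", "estoque", "valor"]):
--         ctx.append("This table contains product or inventory related information.")
--     if any(x in col_names for x in ["pedido", "item", "quantidade"]):
--         ctx.append("This table stores sales orders or order items.")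
--     if any(x in col_names for x in ["valor", "saldo", "pagamento", "conta"]):
--         ctx.append("This table contains financial or accounting data.")
--     if any(x in col_names for x in ["login", "senha", "usuario", "acesso"]):
--         ctx.append("This table relates to system access, authentication or security.")
--
--     if not ctx:
--         ctx.append("This table stores structured business data related to the system domain.")
--
--     return (
--         f"Semantic description for table '{table}': "
--         f"{' '.join(ctx)} It contains the following fields: {', '.join(col_names)}."
--     )
-- ===== SOURCE B (Python) =====
-- _MSGS = [
--     "This table stores information related to clients or people.",
--     "This table contains product or inventory related information.",
--     "This table stores sales orders or order items.",
--     "This table contains financial or accounting data.",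
--     "This table relates to system access, authentication or security.",
-- ]
--
-- # keyword -> bitmask of the message indices it triggers ("valor" triggers 1 and 3)
-- _KW = {
--     "cpf": 1, "cnpj": 1, "cliente": 1, "nome": 1, "email": 1,
--     "produto": 2, "sku": 2, "estoque": 2, "valor": 10,
--     "pedido": 4, "item": 4, "quantidade": 4,
--     "saldo": 8, "pagamento": 8, "conta": 8,
--     "login": 16, "senha": 16, "usuario": 16, "acesso": 16,
-- }
--
-- _DEFAULT = "This table stores structured business data related to the system domain."
--
--
-- def generate_smart_description(table: str, columns: list):
--     col_names = [c["name"].lower() for c in columns]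
--     mask = 0
--     for name in col_names:
--         mask |= _KW.get(name, 0)
--     ctx = [m for i, m in enumerate(_MSGS) if (mask >> i) & 1] or [_DEFAULT]
--     return (
--         f"Semantic description for table '{table}': "
--         f"{' '.join(ctx)} It contains the following fields: {', '.join(col_names)}."
--     )
-- ===== Notes on version B (the rewrite author's own statement) =====
-- stated objective: alternative
-- what changed: Inverts the traversal: instead of five per-rule scans over the column names, B makes one pass over the column names, OR-ing per-keyword bitmasks from a keyword->mask index, and then emits the messages whose bit is set; same default and formatting. Pre_ only excludes columns lacking a 'name' key, where A raises KeyError.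
import Mathlib
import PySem

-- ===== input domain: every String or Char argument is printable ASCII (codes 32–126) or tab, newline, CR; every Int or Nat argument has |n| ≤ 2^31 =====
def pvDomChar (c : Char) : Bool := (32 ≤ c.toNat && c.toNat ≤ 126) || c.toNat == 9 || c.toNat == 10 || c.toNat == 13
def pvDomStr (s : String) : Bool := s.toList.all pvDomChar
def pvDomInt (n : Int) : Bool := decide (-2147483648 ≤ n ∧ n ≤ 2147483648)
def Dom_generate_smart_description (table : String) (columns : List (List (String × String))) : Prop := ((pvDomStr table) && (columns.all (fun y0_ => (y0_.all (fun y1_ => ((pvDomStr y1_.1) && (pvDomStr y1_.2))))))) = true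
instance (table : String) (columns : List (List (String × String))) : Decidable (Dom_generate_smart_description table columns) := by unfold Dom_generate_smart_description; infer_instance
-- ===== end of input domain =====

-- B inverts the traversal: one pass over the column names OR-ing per-keyword bitmasks from a
-- keyword->mask index, then the messages whose bit is set (alternative decomposition, same output).

-- ===== PORT A =====
def gsd_ctx (col_names : List String) : List String :=
  let ctx : List String := []
  let ctx := if (["cpf", "cnpj", "cliente", "nome", "email"].any (fun x => col_names.contains x)) then
    ctx ++ ["This table stores information related to clients or people."] else ctx
  let ctx := if (["produto", "sku", "estoque", "valor"].any (fun x => col_names.contains x)) then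
    ctx ++ ["This table contains product or inventory related information."] else ctx
  let ctx := if (["pedido", "item", "quantidade"].any (fun x => col_names.contains x)) then
    ctx ++ ["This table stores sales orders or order items."] else ctx
  let ctx := if (["valor", "saldo", "pagamento", "conta"].any (fun x => col_names.contains x)) then
    ctx ++ ["This table contains financial or accounting data."] else ctx
  let ctx := if (["login", "senha", "usuario", "acesso"].any (fun x => col_names.contains x)) then
    ctx ++ ["This table relates to system access, authentication or security."] else ctx
  if ctx.isEmpty then
    ctx ++ ["This table stores structured business data related to the system domain."] else ctx

def generate_smart_description (table : String) (columns : List (List (String × String))) : String :=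
  let col_names : List String :=
    columns.map (fun c => PySem.Str.lower (PySem.Dict.getD (PySem.Dict.mk c) "name" ""))
  let ctx := gsd_ctx col_names
  "Semantic description for table '" ++ table ++ "': " ++
    PySem.Str.join " " ctx ++ " It contains the following fields: " ++
    PySem.Str.join ", " col_names ++ "."

-- ===== PORT B =====
def gsd_msgs : List String :=
  [ "This table stores information related to clients or people.",
    "This table contains product or inventory related information.",
    "This table stores sales orders or order items.",
    "This table contains financial or accounting data.",
    "This table relates to system access, authentication or security." ]

-- keyword -> bitmask of the triggered message indices ("valor" triggers bits 1 and 3).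
-- All masks are nonnegative, so Python's |, >> and & on them are exactly the Nat operations.
def gsd_kw : PySem.Dict String Nat := PySem.Dict.mk
  [ ("cpf", 1), ("cnpj", 1), ("cliente", 1), ("nome", 1), ("email", 1),
    ("produto", 2), ("sku", 2), ("estoque", 2), ("valor", 10),
    ("pedido", 4), ("item", 4), ("quantidade", 4),
    ("saldo", 8), ("pagamento", 8), ("conta", 8),
    ("login", 16), ("senha", 16), ("usuario", 16), ("acesso", 16) ]

def gsd_default : String := "This table stores structured business data related to the system domain."

def gsd_mask (col_names : List String) : Nat :=
  col_names.foldl (fun m n => m ||| PySem.Dict.getD gsd_kw n 0) 0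

def gsd_ctx_alt (col_names : List String) : List String :=
  let mask := gsd_mask col_names
  -- enumerate indices are ≥ 0, so '.toNat' on them is exact
  let ctx := ((PySem.List.enumerate gsd_msgs).filter
      (fun p => (mask >>> p.1.toNat) &&& 1 == 1)).map (·.2)
  if ctx.isEmpty then [gsd_default] else ctx

def generate_smart_description_alt (table : String) (columns : List (List (String × String))) : String :=
  let col_names : List String :=
    columns.map (fun c => PySem.Str.lower (PySem.Dict.getD (PySem.Dict.mk c) "name" ""))
  let ctx := gsd_ctx_alt col_names
  "Semantic description for table '" ++ table ++ "': " ++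
    PySem.Str.join " " ctx ++ " It contains the following fields: " ++
    PySem.Str.join ", " col_names ++ "."

-- ===== PRECONDITION & SPEC =====
-- Pre_ excludes exactly the inputs where some column dict has no "name" key: there Python A raises KeyError.
def Pre_generate_smart_description (table : String) (columns : List (List (String × String))) : Prop :=
  columns.all (fun c => PySem.Dict.contains (PySem.Dict.mk c) "name") = true
instance (table : String) (columns : List (List (String × String))) : Decidable (Pre_generate_smart_description table columns) := by unfold Pre_generate_smart_description; infer_instance

def pvWitness_generate_smart_description : String × (List (List (String × String))) :=
  ("clients", [[("name", "CPF")], [("name", "email"), ("type", "text")]])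

def Spec_generate_smart_description (table : String) (columns : List (List (String × String))) (out : String) : Prop := out = generate_smart_description_alt table columns
instance (table : String) (columns : List (List (String × String))) (out : String) : Decidable (Spec_generate_smart_description table columns out) := by unfold Spec_generate_smart_description; infer_instance

-- ===== CLAIM (what is proved, stated in full; the proofs are below) =====
def Claim_equal_generate_smart_description : Prop := ∀ (table : String) (columns : List (List (String × String))), Dom_generate_smart_description table columns → Pre_generate_smart_description table columns → Spec_generate_smart_description table columns (generate_smart_description table columns)

-- ===== LEMMAS AND PROOFS =====
theorem and1_eq_testBit (m i : Nat) : ((m >>> i) &&& 1 == 1) = m.testBit i := by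
  simp [Nat.testBit, Nat.and_comm]

theorem testBit_foldl_or (f : String → Nat) (cn : List String) (a i : Nat) :
    (cn.foldl (fun m n => m ||| f n) a).testBit i
      = (a.testBit i || cn.any fun n => (f n).testBit i) := by
  induction cn generalizing a with
  | nil => simp
  | cons x xs ih => simp [List.foldl_cons, ih, Nat.testBit_or, Bool.or_assoc]

theorem any_contains_comm (xs ys : List String) :
    xs.any (fun x => ys.contains x) = ys.any (fun y => xs.contains y) := by
  rw [Bool.eq_iff_iff]; simp [List.any_eq_true]; tauto

theorem gsd_kw_not_mem (n : String) (h : n ∉ (["cpf", "cnpj", "cliente", "nome", "email", "produto", "sku", "estoque", "valor", "pedido", "item", "quantidade", "saldo", "pagamento", "conta", "login", "senha", "usuario", "acesso"] : List String)) :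
    PySem.Dict.getD gsd_kw n 0 = 0 := by
  simp only [List.mem_cons, List.not_mem_nil, or_false, not_or] at h
  obtain ⟨h1, h2, h3, h4, h5, h6, h7, h8, h9, h10, h11, h12, h13, h14, h15, h16, h17, h18, h19⟩ := h
  simp [gsd_kw, PySem.Dict.getD_eq_get?_getD, PySem.Dict.get?,
    Ne.symm h1, Ne.symm h2, Ne.symm h3, Ne.symm h4, Ne.symm h5, Ne.symm h6, Ne.symm h7, Ne.symm h8, Ne.symm h9, Ne.symm h10, Ne.symm h11, Ne.symm h12, Ne.symm h13, Ne.symm h14, Ne.symm h15, Ne.symm h16, Ne.symm h17, Ne.symm h18, Ne.symm h19]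

set_option maxHeartbeats 1000000 in
theorem gsd_kwbit0 (n : String) : (PySem.Dict.getD gsd_kw n 0).testBit 0
    = (["cpf", "cnpj", "cliente", "nome", "email"] : List String).contains n := by
  by_cases h : n ∈ (["cpf", "cnpj", "cliente", "nome", "email", "produto", "sku", "estoque", "valor", "pedido", "item", "quantidade", "saldo", "pagamento", "conta", "login", "senha", "usuario", "acesso"] : List String)
  · fin_cases h <;> decide
  · rw [gsd_kw_not_mem n h]
    simp only [List.mem_cons, List.not_mem_nil, or_false, not_or] at h
    obtain ⟨h1, h2, h3, h4, h5, -, -, -, -, -, -, -, -, -, -, -, -, -, -⟩ := h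
    simp [h1, h2, h3, h4, h5]

set_option maxHeartbeats 1000000 in
theorem gsd_kwbit1 (n : String) : (PySem.Dict.getD gsd_kw n 0).testBit 1
    = (["produto", "sku", "estoque", "valor"] : List String).contains n := by
  by_cases h : n ∈ (["cpf", "cnpj", "cliente", "nome", "email", "produto", "sku", "estoque", "valor", "pedido", "item", "quantidade", "saldo", "pagamento", "conta", "login", "senha", "usuario", "acesso"] : List String)
  · fin_cases h <;> decide
  · rw [gsd_kw_not_mem n h]
    simp only [List.mem_cons, List.not_mem_nil, or_false, not_or] at h
    obtain ⟨-, -, -, -, -, h6, h7, h8, h9, -, -, -, -, -, -, -, -, -, -⟩ := h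
    simp [Nat.zero_testBit, h6, h7, h8, h9]

set_option maxHeartbeats 1000000 in
theorem gsd_kwbit2 (n : String) : (PySem.Dict.getD gsd_kw n 0).testBit 2
    = (["pedido", "item", "quantidade"] : List String).contains n := by
  by_cases h : n ∈ (["cpf", "cnpj", "cliente", "nome", "email", "produto", "sku", "estoque", "valor", "pedido", "item", "quantidade", "saldo", "pagamento", "conta", "login", "senha", "usuario", "acesso"] : List String)
  · fin_cases h <;> decide
  · rw [gsd_kw_not_mem n h]
    simp only [List.mem_cons, List.not_mem_nil, or_false, not_or] at h
    obtain ⟨-, -, -, -, -, -, -, -, -, h10, h11, h12, -, -, -, -, -, -, -⟩ := h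
    simp [Nat.zero_testBit, h10, h11, h12]

set_option maxHeartbeats 1000000 in
theorem gsd_kwbit3 (n : String) : (PySem.Dict.getD gsd_kw n 0).testBit 3
    = (["valor", "saldo", "pagamento", "conta"] : List String).contains n := by
  by_cases h : n ∈ (["cpf", "cnpj", "cliente", "nome", "email", "produto", "sku", "estoque", "valor", "pedido", "item", "quantidade", "saldo", "pagamento", "conta", "login", "senha", "usuario", "acesso"] : List String)
  · fin_cases h <;> decide
  · rw [gsd_kw_not_mem n h]
    simp only [List.mem_cons, List.not_mem_nil, or_false, not_or] at h
    obtain ⟨-, -, -, -, -, -, -, -, h9, -, -, -, h13, h14, h15, -, -, -, -⟩ := h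
    simp [Nat.zero_testBit, h9, h13, h14, h15]

set_option maxHeartbeats 1000000 in
theorem gsd_kwbit4 (n : String) : (PySem.Dict.getD gsd_kw n 0).testBit 4
    = (["login", "senha", "usuario", "acesso"] : List String).contains n := by
  by_cases h : n ∈ (["cpf", "cnpj", "cliente", "nome", "email", "produto", "sku", "estoque", "valor", "pedido", "item", "quantidade", "saldo", "pagamento", "conta", "login", "senha", "usuario", "acesso"] : List String)
  · fin_cases h <;> decide
  · rw [gsd_kw_not_mem n h]
    simp only [List.mem_cons, List.not_mem_nil, or_false, not_or] at h
    obtain ⟨-, -, -, -, -, -, -, -, -, -, -, -, -, -, -, h16, h17, h18, h19⟩ := h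
    simp [Nat.zero_testBit, h16, h17, h18, h19]

theorem gsd_mask_bit (cn : List String) (i : Nat) :
    (gsd_mask cn).testBit i = cn.any (fun n => (PySem.Dict.getD gsd_kw n 0).testBit i) := by
  unfold gsd_mask
  simpa using testBit_foldl_or (fun n => PySem.Dict.getD gsd_kw n 0) cn 0 i

set_option maxHeartbeats 1000000 in
theorem gsd_ctx_eq (cn : List String) : gsd_ctx_alt cn = gsd_ctx cn := by
  unfold gsd_ctx_alt gsd_ctx
  have henum : PySem.List.enumerate gsd_msgs =
      [ ((0 : Int), "This table stores information related to clients or people."),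
        (1, "This table contains product or inventory related information."),
        (2, "This table stores sales orders or order items."),
        (3, "This table contains financial or accounting data."),
        (4, "This table relates to system access, authentication or security.") ] := by rfl
  rw [henum]
  simp only [List.filter_cons, List.filter_nil, show ((0:Int).toNat = 0) from rfl, show ((1:Int).toNat = 1) from rfl,
    show ((2:Int).toNat = 2) from rfl, show ((3:Int).toNat = 3) from rfl,
    show ((4:Int).toNat = 4) from rfl,
    and1_eq_testBit, gsd_mask_bit]
  rw [show (fun n => (PySem.Dict.getD gsd_kw n 0).testBit 0)
        = (fun n => (["cpf", "cnpj", "cliente", "nome", "email"] : List String).contains n)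
      from funext gsd_kwbit0,
      show (fun n => (PySem.Dict.getD gsd_kw n 0).testBit 1)
        = (fun n => (["produto", "sku", "estoque", "valor"] : List String).contains n)
      from funext gsd_kwbit1,
      show (fun n => (PySem.Dict.getD gsd_kw n 0).testBit 2)
        = (fun n => (["pedido", "item", "quantidade"] : List String).contains n)
      from funext gsd_kwbit2,
      show (fun n => (PySem.Dict.getD gsd_kw n 0).testBit 3)
        = (fun n => (["valor", "saldo", "pagamento", "conta"] : List String).contains n)
      from funext gsd_kwbit3,
      show (fun n => (PySem.Dict.getD gsd_kw n 0).testBit 4)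
        = (fun n => (["login", "senha", "usuario", "acesso"] : List String).contains n)
      from funext gsd_kwbit4,
      any_contains_comm cn, any_contains_comm cn, any_contains_comm cn,
      any_contains_comm cn, any_contains_comm cn]
  generalize (["cpf", "cnpj", "cliente", "nome", "email"].any (fun x => cn.contains x)) = p1
  generalize (["produto", "sku", "estoque", "valor"].any (fun x => cn.contains x)) = p2
  generalize (["pedido", "item", "quantidade"].any (fun x => cn.contains x)) = p3
  generalize (["valor", "saldo", "pagamento", "conta"].any (fun x => cn.contains x)) = p4
  generalize (["login", "senha", "usuario", "acesso"].any (fun x => cn.contains x)) = p5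
  cases p1 <;> cases p2 <;> cases p3 <;> cases p4 <;> cases p5 <;> rfl

-- ===== VERDICT (by name: the statement is the Claim_ definition above) =====
theorem generate_smart_description_spec : Claim_equal_generate_smart_description := by
  intro table columns _ _
  unfold Spec_generate_smart_description
  simp only [generate_smart_description, generate_smart_description_alt, gsd_ctx_eq]
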